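-- pv_equiv track=rewrite | github.com/spyking-circus/spyking-circus | circus/shared/utils.py | maxstuff
-- ===== SOURCE A (Python) =====
-- def maxstuff(X):
--     index = 0
--     maxi = X[0]
--     for i in range(1, len(X)):
--         if X[i] > maxi:
--             maxi = X[i]
--             index = i
--     return maxi, index
-- ===== SOURCE B (Python) =====
-- def maxstuff(X):
--     maxi = max(X)
--     return maxi, X.index(maxi)
-- ===== Notes on version B (the rewrite author's own statement) =====
-- stated objective: idiomatic
-- what changed: Replaced the hand-written index-tracking loop by two builtin passes: max(X) then X.index(maxi), relying on max's strict-> comparison and .index's first-occurrence rule to reproduce A's first-index-of-max result.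
-- outside the precondition, e.g. on maxstuff([]): A raises IndexError, B raises ValueError
import Mathlib
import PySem

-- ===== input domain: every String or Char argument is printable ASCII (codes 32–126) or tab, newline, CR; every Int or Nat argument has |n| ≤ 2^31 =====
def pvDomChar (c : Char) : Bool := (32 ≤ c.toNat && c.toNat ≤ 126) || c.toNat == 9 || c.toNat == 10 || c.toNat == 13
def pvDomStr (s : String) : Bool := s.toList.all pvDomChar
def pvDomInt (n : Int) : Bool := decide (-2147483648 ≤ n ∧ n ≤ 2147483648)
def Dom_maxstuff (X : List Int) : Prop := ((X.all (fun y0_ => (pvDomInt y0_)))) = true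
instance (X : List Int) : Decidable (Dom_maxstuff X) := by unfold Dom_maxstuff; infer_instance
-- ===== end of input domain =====

-- B replaces A's single index-tracking loop by two builtin passes (max, then first index of it); same O(n) cost, more idiomatic.

-- ===== PORT A =====
def maxstuff (X : List Int) : Int × Int :=
  (PySem.List.pyRange 1 (X.length : Int) 1).foldl
    (fun (s : Int × Int) (i : Int) =>
      if PySem.List.pyGetD X i 0 > s.1 then (PySem.List.pyGetD X i 0, i) else s)
    (PySem.List.pyGetD X 0 0, 0)

-- ===== PORT B =====
def maxstuff_alt (X : List Int) : Int × Int :=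
  match PySem.List.max? X (fun y => y) with
  | none => (0, 0)      -- unreachable under Pre_ (Python max raises on [])
  | some maxi => (maxi, (((PySem.List.index? X maxi).getD 0 : Nat) : Int))

-- ===== PRECONDITION & SPEC =====
-- A raises IndexError on [] (X[0]) and B raises ValueError there (max of empty); [] is outside Pre_.
def Pre_maxstuff (X : List Int) : Prop := X ≠ []
instance (X : List Int) : Decidable (Pre_maxstuff X) := by unfold Pre_maxstuff; infer_instance
def pvWitness_maxstuff : List Int := [1, 2]

def Spec_maxstuff (X : List Int) (out : Int × Int) : Prop := out = maxstuff_alt X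
instance (X : List Int) (out : Int × Int) : Decidable (Spec_maxstuff X out) := by unfold Spec_maxstuff; infer_instance

-- ===== CLAIM (what is proved, stated in full; the proofs are below) =====
def Claim_equal_maxstuff : Prop := ∀ (X : List Int), Dom_maxstuff X → Pre_maxstuff X → Spec_maxstuff X (maxstuff X)

-- ===== LEMMAS AND PROOFS =====

-- A's loop on Y ++ [a] is its loop on Y followed by one comparison step.
lemma maxstuff_append (Y : List Int) (hY : Y ≠ []) (a : Int) :
    maxstuff (Y ++ [a]) =
      (if a > (maxstuff Y).1 then (a, (Y.length : Int)) else maxstuff Y) := by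
  have hlen : ((Y ++ [a]).length : Int) = (Y.length : Int) + 1 := by simp
  have h1 : (1 : Int) ≤ (Y.length : Int) := by
    have : 0 < Y.length := List.length_pos_iff.mpr hY
    omega
  unfold maxstuff
  rw [hlen, PySem.List.pyRange_one_succ_right h1, List.foldl_append]
  have hget0 : PySem.List.pyGetD (Y ++ [a]) 0 0 = PySem.List.pyGetD Y 0 0 := by
    cases Y with
    | nil => exact absurd rfl hY
    | cons x t => simp [PySem.List.pyGetD_zero_cons]
  have hcongr :
      (PySem.List.pyRange 1 (Y.length : Int) 1).foldl
        (fun (s : Int × Int) (i : Int) =>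
          if PySem.List.pyGetD (Y ++ [a]) i 0 > s.1 then (PySem.List.pyGetD (Y ++ [a]) i 0, i) else s)
        (PySem.List.pyGetD (Y ++ [a]) 0 0, 0)
      = (PySem.List.pyRange 1 (Y.length : Int) 1).foldl
        (fun (s : Int × Int) (i : Int) =>
          if PySem.List.pyGetD Y i 0 > s.1 then (PySem.List.pyGetD Y i 0, i) else s)
        (PySem.List.pyGetD Y 0 0, 0) := by
    rw [hget0]
    apply PySem.List.foldl_congr_mem
    intro s i hi
    have hmem := (PySem.List.mem_pyRange_one).mp hi
    have hgi : PySem.List.pyGetD (Y ++ [a]) i 0 = PySem.List.pyGetD Y i 0 := by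
      have hi0 : 0 ≤ i := by omega
      have hiL : i < ((Y ++ [a]).length : Int) := by simp; omega
      have hiY : i < (Y.length : Int) := hmem.2
      rw [PySem.List.pyGetD_eq_getElem (Y ++ [a]) 0 hi0 (by simpa using hiL),
          PySem.List.pyGetD_eq_getElem Y 0 hi0 hiY]
      exact List.getElem_append_left (by omega)
    rw [hgi]
  rw [hcongr]
  have hlast : PySem.List.pyGetD (Y ++ [a]) (Y.length : Int) 0 = a := by
    simp [PySem.List.pyGetD_natCast]
  simp only [List.foldl_cons, List.foldl_nil, hlast]

lemma maxstuff_key (x : Int) (t : List Int) : maxstuff (x :: t) = maxstuff_alt (x :: t) := by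
  induction t using List.reverseRecOn with
  | nil =>
      simp [maxstuff, maxstuff_alt, PySem.List.pyRange_one_eq_nil,
        PySem.List.max?_id_cons, PySem.List.pyGetD_zero_cons]
  | append_singleton s a ih =>
      have hx : (x :: (s ++ [a])) = (x :: s) ++ [a] := by simp
      rw [hx, maxstuff_append (x :: s) (by simp) a, ih]
      set M := s.foldl max x with hMdef
      have hM : PySem.List.max? (x :: s) (fun y => y) = some M :=
        PySem.List.max?_id_cons x s
      have hfold : (s ++ [a]).foldl max x = max M a := by
        rw [List.foldl_append]; rfl
      have hM' : PySem.List.max? ((x :: s) ++ [a]) (fun y => y) = some (max M a) := by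
        rw [← hx, PySem.List.max?_id_cons x (s ++ [a]), hfold]
      simp only [maxstuff_alt, hM, hM']
      by_cases hcmp : a > M
      · -- the appended element is a new strict maximum
        have hnotmem : a ∉ (x :: s) := by
          intro hmem
          have hle : ∀ y ∈ x :: s, y ≤ M := by
            intro y hy
            rcases List.mem_cons.mp hy with h | h
            · subst h; exact (PySem.List.le_foldl_max s y).1
            · exact (PySem.List.le_foldl_max s x).2 y h
          exact absurd (hle a hmem) (not_le.mpr hcmp)
        have hmaxa : max M a = a := max_eq_right (le_of_lt hcmp)
        have hidx : PySem.List.index? ((x :: s) ++ [a]) a = some (x :: s).length :=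
          PySem.List.index?_append_singleton_self (x :: s) a hnotmem
        rw [if_pos hcmp, hmaxa, hidx]
        simp
      · -- the old maximum survives, with its old first index
        have hmaxM : max M a = M := max_eq_left (by omega)
        have hMmem : M ∈ x :: s := by
          rcases PySem.List.foldl_max_mem s x with h | h
          · rw [hMdef, h]; exact List.mem_cons_self
          · exact List.mem_cons_of_mem x h
        have hidx : PySem.List.index? ((x :: s) ++ [a]) M = PySem.List.index? (x :: s) M :=
          PySem.List.index?_append_of_mem [a] hMmem
        rw [if_neg hcmp, hmaxM, hidx]

-- ===== VERDICT (by name: the statement is the Claim_ definition above) =====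
theorem maxstuff_spec : Claim_equal_maxstuff := by
  intro X _ hpre
  cases X with
  | nil => exact absurd rfl hpre
  | cons x t => exact maxstuff_key x t
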